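-- pv_equiv track=rewrite | github.com/machkouroke/Smart_Calculator | calculator.py | string_dissociator
-- ===== SOURCE A (Python) =====
-- operations = {
--     '+': lambda a, b: a + b,
--     '-': lambda a, b: a - b,
--     '*': lambda a, b: a * b,
--     '/': lambda a, b: a // b,
--     '^': lambda a, b: a ** b,
-- }
--
-- def str_to_number(string):
--     """
--     Converts a string of the form '(+/-)1' * n
--     into a list where the digits are dissociated
--     :param string: string of '(+/-)1' * n
--     :return: list where the digits are dissociated
--     """
--     x = 0
--     number = []
--     while x < len(string):
--         if string[x] == '-':
--             number.append(-1)
--             x += 2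
--             continue
--         number.append(string[x])
--         x += 1
--     return number
--
-- def sign_eval(sgn_list):
--     """
--     Evaluate signs and return their equivalent sign
--     :param sgn_list: sign list
--     :return: list of equivalent signs
--     """
--     signe = {'+': 1, '-': -1}
--     new_sgn_list = []
--     for x in sgn_list:
--         if '*' in x or '/' in x or '^' in x:
--             new_sgn_list.append(x)
--         else:
--             x_num = x
--             for a, b in signe.items():
--                 x_num = x_num.replace(a, str(b))
--             x_num = str_to_number(x_num)
--             s = 1
--             for k in x_num:
--                 s *= int(k)
--             new_sgn_list.append('+') if s == 1 else new_sgn_list.append('-')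
--     return new_sgn_list
--
-- def string_dissociator(s):
--     """
--     Separates the expression in tuple of sign and number
--     :param s: expression
--     :return: the tuple containing the list of signs and the list of numbers
--     """
--     signs, number, x = [], [], 0
--     while x < len(s):
--         if s[x] in operations:
--             sig = []
--             for _ in range(x, len(s)):
--                 if s[x] in operations:
--                     sig += s[x]
--                     x += 1
--                     continue
--                 break
--             signs.append(''.join(sig))
--         else:
--             if x == 0:
--                 signs.append('')
--             num = []
--             for _ in range(x, len(s)):
--                 if s[x] not in operations:
--                     num += s[x]
--                     x += 1
--                     continue
--                 break
--             number.append(''.join(num))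
--     signs = sign_eval(signs)
--     return signs, number
-- ===== SOURCE B (Python) =====
-- # B: single left-to-right pass grouping characters into tagged runs (operator/number),
-- # then partitioning the runs; simpler decomposition than A's index-jumping nested loops.
-- operations = {
--     '+': lambda a, b: a + b,
--     '-': lambda a, b: a - b,
--     '*': lambda a, b: a * b,
--     '/': lambda a, b: a // b,
--     '^': lambda a, b: a ** b,
-- }
--
-- def str_to_number(string):
--     x = 0
--     number = []
--     while x < len(string):
--         if string[x] == '-':
--             number.append(-1)
--             x += 2
--             continue
--         number.append(string[x])
--         x += 1
--     return number
--
-- def sign_eval(sgn_list):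
--     signe = {'+': 1, '-': -1}
--     new_sgn_list = []
--     for x in sgn_list:
--         if '*' in x or '/' in x or '^' in x:
--             new_sgn_list.append(x)
--         else:
--             x_num = x
--             for a, b in signe.items():
--                 x_num = x_num.replace(a, str(b))
--             x_num = str_to_number(x_num)
--             s = 1
--             for k in x_num:
--                 s *= int(k)
--             new_sgn_list.append('+') if s == 1 else new_sgn_list.append('-')
--     return new_sgn_list
--
-- def string_dissociator(s):
--     runs, cur_key, cur = [], None, ''
--     for c in s:
--         k = c in operations
--         if k == cur_key:
--             cur += c
--         else:
--             if cur_key is not None: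
--                 runs.append((cur_key, cur))
--             cur_key, cur = k, c
--     if cur_key is not None:
--         runs.append((cur_key, cur))
--     signs = [run for k, run in runs if k]
--     number = [run for k, run in runs if not k]
--     if s and s[0] not in operations:
--         signs.insert(0, '')
--     return sign_eval(signs), number
-- ===== Notes on version B (the rewrite author's own statement) =====
-- stated objective: simpler
-- what changed: A's index-driven while loop with nested for-range scans and an inline x==0 special case is replaced by a single character-by-character pass that groups the string into tagged (is_operator, run) pairs, after which signs and numbers are obtained by partitioning the runs; sign_eval/str_to_number are unchanged.
import Mathlib
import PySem

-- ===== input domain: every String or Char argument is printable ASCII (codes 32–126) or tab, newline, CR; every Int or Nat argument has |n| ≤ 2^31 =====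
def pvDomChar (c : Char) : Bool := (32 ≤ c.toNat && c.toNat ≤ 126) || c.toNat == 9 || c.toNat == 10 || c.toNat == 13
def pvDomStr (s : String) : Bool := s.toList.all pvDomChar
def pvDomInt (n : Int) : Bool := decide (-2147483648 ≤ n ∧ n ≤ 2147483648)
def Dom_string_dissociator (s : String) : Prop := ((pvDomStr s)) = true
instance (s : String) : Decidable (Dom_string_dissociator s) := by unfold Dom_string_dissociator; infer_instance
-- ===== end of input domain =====

-- B replaces A's index-driven loop with nested scans by one pass grouping the string into
-- tagged runs, then partitioning the runs (objective: simpler decomposition; same cost).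

-- ===== SHARED HELPERS (operations keys; sign_eval and str_to_number, identical in A and B) =====
def opChars : List Char := ['+', '-', '*', '/', '^']

-- `c in operations` (membership in the dict's keys)
def isOp (c : Char) : Bool := opChars.contains c

-- str_to_number: while loop with index x, skipping 2 after a '-' ; elements are either the
-- literal int -1 or the one-character string string[x] (Sum mirrors the mixed Python list)
def strToNumberGo (cs : List Char) (fuel x : Nat) : List (Int ⊕ String) :=
  match fuel with
  | 0 => []
  | fuel + 1 =>
    if x < cs.length then
      if cs.getD x ' ' = '-' then Sum.inl (-1) :: strToNumberGo cs fuel (x + 2)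
      else Sum.inr (String.ofList [cs.getD x ' ']) :: strToNumberGo cs fuel (x + 1)
    else []

def strToNumber (s : String) : List (Int ⊕ String) :=
  strToNumberGo s.toList s.toList.length 0

-- int(k): k is already an int, or a one-character string; in every call sign_eval makes, that
-- string is '1', so the ValueError (none) branch of ofStr? is unreachable (getD 0 never fires)
def intOf : Int ⊕ String → Int
  | Sum.inl n => n
  | Sum.inr t => (PySem.Int.ofStr? t).getD 0

-- body of sign_eval's for loop for one sign string
def signEvalOne (x : String) : String :=
  if PySem.Str.isIn "*" x || PySem.Str.isIn "/" x || PySem.Str.isIn "^" x then x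
  else
    let xnum := PySem.Str.replace (PySem.Str.replace x "+" "1") "-" "-1"
    let l := strToNumber xnum
    let s := l.foldl (fun acc k => acc * intOf k) 1
    if s = 1 then "+" else "-"

-- sign_eval: append signEvalOne of each element in order
def signEval (l : List String) : List String := l.map signEvalOne

-- ===== PORT A =====
-- inner `for _ in range(x, len(s))` collecting operator chars into sig (fuel = len - x)
def aSig (cs : List Char) (fuel x : Nat) (sig : List Char) : List Char × Nat :=
  match fuel with
  | 0 => (sig, x)
  | fuel + 1 =>
    if isOp (cs.getD x ' ') then aSig cs fuel (x + 1) (sig ++ [cs.getD x ' '])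
    else (sig, x)

-- inner `for _ in range(x, len(s))` collecting non-operator chars into num
def aNum (cs : List Char) (fuel x : Nat) (num : List Char) : List Char × Nat :=
  match fuel with
  | 0 => (num, x)
  | fuel + 1 =>
    if !isOp (cs.getD x ' ') then aNum cs fuel (x + 1) (num ++ [cs.getD x ' '])
    else (num, x)

-- outer `while x < len(s)` (x strictly increases each iteration, so fuel = len s suffices)
def aLoop (cs : List Char) (fuel x : Nat) (signs number : List String) :
    List String × List String :=
  match fuel with
  | 0 => (signs, number)
  | fuel + 1 =>
    if x < cs.length then
      if isOp (cs.getD x ' ') then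
        let p := aSig cs (cs.length - x) x []
        aLoop cs fuel p.2 (signs ++ [String.ofList p.1]) number
      else
        let signs := if x = 0 then signs ++ [""] else signs
        let p := aNum cs (cs.length - x) x []
        aLoop cs fuel p.2 signs (number ++ [String.ofList p.1])
    else (signs, number)

def string_dissociator (s : String) : List String × List String :=
  let cs := s.toList
  let p := aLoop cs cs.length 0 [] []
  (signEval p.1, p.2)

-- ===== PORT B =====
-- one step of B's for loop: state = (runs, cur_key, cur)
def bStep (st : List (Bool × List Char) × Option Bool × List Char) (c : Char) :
    List (Bool × List Char) × Option Bool × List Char :=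
  let (runs, curKey, cur) := st
  let k := isOp c
  if curKey = some k then (runs, curKey, cur ++ [c])
  else
    match curKey with
    | none => (runs, some k, [c])
    | some kk => (runs ++ [(kk, cur)], some k, [c])

-- trailing `if cur_key is not None: runs.append((cur_key, cur))`
def bFlush (st : List (Bool × List Char) × Option Bool × List Char) :
    List (Bool × List Char) :=
  match st with
  | (runs, none, _) => runs
  | (runs, some kk, cur) => runs ++ [(kk, cur)]

def bRuns (cs : List Char) : List (Bool × List Char) :=
  bFlush (cs.foldl bStep ([], none, []))

def string_dissociator_alt (s : String) : List String × List String :=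
  let cs := s.toList
  let rs := bRuns cs
  let signs := rs.filterMap (fun kg => if kg.1 then some (String.ofList kg.2) else none)
  let number := rs.filterMap (fun kg => if kg.1 then none else some (String.ofList kg.2))
  let signs :=
    match cs with
    | [] => signs
    | c :: _ => if isOp c then signs else "" :: signs
  (signEval signs, number)

-- ===== PRECONDITION & SPEC =====
def Spec_string_dissociator (s : String) (out : List String × List String) : Prop := out = string_dissociator_alt s
instance (s : String) (out : List String × List String) : Decidable (Spec_string_dissociator s out) := by unfold Spec_string_dissociator; infer_instance

-- ===== CLAIM (what is proved, stated in full; the proofs are below) =====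
def Claim_equal_string_dissociator : Prop := ∀ (s : String), Dom_string_dissociator s → Spec_string_dissociator s (string_dissociator s)

-- ===== LEMMAS AND PROOFS =====

-- canonical run decomposition both ports are proved against
def runsD (cs : List Char) : List (Bool × List Char) :=
  match cs with
  | [] => []
  | c :: rest =>
    if isOp c then
      (true, (c :: rest).takeWhile isOp) :: runsD ((c :: rest).dropWhile isOp)
    else
      (false, (c :: rest).takeWhile (fun d => !isOp d)) ::
        runsD ((c :: rest).dropWhile (fun d => !isOp d))
termination_by cs.length
decreasing_by
  · simp [List.dropWhile_cons, *]
    exact List.length_dropWhile_le _ _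
  · simp [List.dropWhile_cons, *]
    exact List.length_dropWhile_le _ _

def signsFrom (rs : List (Bool × List Char)) : List String :=
  rs.filterMap (fun kg => if kg.1 then some (String.ofList kg.2) else none)

def numsFrom (rs : List (Bool × List Char)) : List String :=
  rs.filterMap (fun kg => if kg.1 then none else some (String.ofList kg.2))

lemma getD_eq_headD_drop (cs : List Char) (x : Nat) (d : Char) :
    cs[x]?.getD d = (cs.drop x).headD d := by
  induction cs generalizing x with
  | nil => simp
  | cons c t ih =>
    cases x with
    | zero => rfl
    | succ n => rw [List.getElem?_cons_succ, List.drop_succ_cons]; exact ih n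

lemma drop_takeWhile_length (p : Char → Bool) (t : List Char) :
    t.drop (t.takeWhile p).length = t.dropWhile p := by
  conv_rhs => rw [← List.drop_left (l₁ := t.takeWhile p) (l₂ := t.dropWhile p)]
  rw [List.takeWhile_append_dropWhile]

lemma len_takeWhile_add_dropWhile (p : Char → Bool) (t : List Char) :
    (t.takeWhile p).length + (t.dropWhile p).length = t.length := by
  rw [← List.length_append, List.takeWhile_append_dropWhile]

lemma aSig_spec (cs : List Char) (t : List Char) :
    ∀ x sig, cs.drop x = t →
      aSig cs t.length x sig = (sig ++ t.takeWhile isOp, x + (t.takeWhile isOp).length) := by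
  induction t with
  | nil => intro x sig _; simp [aSig]
  | cons c t' ih =>
    intro x sig h
    have hc : cs[x]?.getD ' ' = c := by rw [getD_eq_headD_drop, h]; rfl
    have h' : cs.drop (x + 1) = t' := by rw [← List.drop_drop, h]; rfl
    by_cases hop : isOp c
    · simp only [List.length_cons, aSig, List.getD_eq_getElem?_getD, hc, hop, if_pos]
      rw [ih (x + 1) (sig ++ [c]) h']
      simp [List.takeWhile_cons, hop]
      omega
    · simp [aSig, List.getD_eq_getElem?_getD, hc, hop, List.takeWhile_cons]

lemma aNum_spec (cs : List Char) (t : List Char) :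
    ∀ x num, cs.drop x = t →
      aNum cs t.length x num = (num ++ t.takeWhile (fun d => !isOp d),
        x + (t.takeWhile (fun d => !isOp d)).length) := by
  induction t with
  | nil => intro x num _; simp [aNum]
  | cons c t' ih =>
    intro x num h
    have hc : cs[x]?.getD ' ' = c := by rw [getD_eq_headD_drop, h]; rfl
    have h' : cs.drop (x + 1) = t' := by rw [← List.drop_drop, h]; rfl
    by_cases hop : isOp c
    · simp [aNum, List.getD_eq_getElem?_getD, hc, hop, List.takeWhile_cons]
    · simp only [List.length_cons, aNum, List.getD_eq_getElem?_getD, hc, hop,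
        Bool.not_false, if_pos]
      rw [ih (x + 1) (num ++ [c]) h']
      simp [List.takeWhile_cons, hop]
      omega

lemma aLoop_spec (cs : List Char) :
    ∀ fuel t x signs number, cs.drop x = t → 0 < x → t.length ≤ fuel →
      aLoop cs fuel x signs number =
        (signs ++ signsFrom (runsD t), number ++ numsFrom (runsD t)) := by
  intro fuel
  induction fuel with
  | zero =>
    intro t x signs number h _ hlen
    have : t = [] := List.eq_nil_of_length_eq_zero (Nat.le_zero.mp hlen)
    subst this
    simp [aLoop, runsD, signsFrom, numsFrom]
  | succ fuel ih =>
    intro t x signs number h hx hlen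
    cases t with
    | nil =>
      have hge : ¬ x < cs.length := by
        have := List.drop_eq_nil_iff.mp h; omega
      simp [aLoop, hge, runsD, signsFrom, numsFrom]
    | cons c t' =>
      have hlt : x < cs.length := by
        by_contra hge
        have : cs.drop x = [] := List.drop_eq_nil_iff.mpr (by omega)
        simp [h] at this
      have hc : cs[x]?.getD ' ' = c := by rw [getD_eq_headD_drop, h]; rfl
      have hfl : cs.length - x = (c :: t').length := by
        have := congrArg List.length h
        simp [List.length_drop] at this
        simp only [List.length_cons]
        omega
      have hlen' : t'.length + 1 ≤ fuel + 1 := by simpa using hlen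
      by_cases hop : isOp c
      · -- operator run
        have htw := aSig_spec cs (c :: t') x [] h
        have hk1 : 0 < ((c :: t').takeWhile isOp).length := by
          simp [List.takeWhile_cons, hop]
        have hsum := len_takeWhile_add_dropWhile isOp (c :: t')
        have hdrop : cs.drop (x + ((c :: t').takeWhile isOp).length) =
            (c :: t').dropWhile isOp := by
          rw [← List.drop_drop, h, drop_takeWhile_length]
        have hfuel : ((c :: t').dropWhile isOp).length ≤ fuel := by
          simp only [List.length_cons] at hsum
          omega
        simp only [aLoop, List.getD_eq_getElem?_getD, hlt, if_pos, hc, hop, hfl, htw]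
        rw [ih _ _ _ _ hdrop (by omega) hfuel]
        have hruns : runsD (c :: t') =
            (true, (c :: t').takeWhile isOp) :: runsD ((c :: t').dropWhile isOp) := by
          rw [runsD]; simp [hop]
        simp [hruns, signsFrom, numsFrom]
      · -- number run
        have htw := aNum_spec cs (c :: t') x [] h
        have hk1 : 0 < ((c :: t').takeWhile (fun d => !isOp d)).length := by
          simp [List.takeWhile_cons, hop]
        have hsum := len_takeWhile_add_dropWhile (fun d => !isOp d) (c :: t')
        have hdrop : cs.drop (x + ((c :: t').takeWhile (fun d => !isOp d)).length) =
            (c :: t').dropWhile (fun d => !isOp d) := by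
          rw [← List.drop_drop, h, drop_takeWhile_length]
        have hx0 : ¬ x = 0 := by omega
        have hfuel : ((c :: t').dropWhile (fun d => !isOp d)).length ≤ fuel := by
          simp only [List.length_cons] at hsum
          omega
        simp only [aLoop, List.getD_eq_getElem?_getD, hlt, if_pos, hc, hop, hfl, htw, hx0,
          Bool.not_true, Bool.not_false, if_false, if_neg, not_false_eq_true]
        rw [ih _ _ _ _ hdrop (by omega) hfuel]
        have hruns : runsD (c :: t') =
            (false, (c :: t').takeWhile (fun d => !isOp d)) ::
              runsD ((c :: t').dropWhile (fun d => !isOp d)) := by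
          rw [runsD]; simp [hop]
        simp [hruns, signsFrom, numsFrom]

-- glue: prepend a partial run of key k onto a run decomposition
def glue (k : Bool) (cur : List Char) : List (Bool × List Char) → List (Bool × List Char)
  | [] => [(k, cur)]
  | (kh, g) :: rs => if kh = k then (k, cur ++ g) :: rs else (k, cur) :: (kh, g) :: rs

lemma glue_glue (k : Bool) (cur d : List Char) (rs : List (Bool × List Char)) :
    glue k cur (glue k d rs) = glue k (cur ++ d) rs := by
  cases rs with
  | nil => simp [glue]
  | cons p rs' =>
    obtain ⟨kh, g⟩ := p
    by_cases hk : kh = k <;> simp [glue, hk]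

lemma glue_head_ne (k k' : Bool) (cur d : List Char) (rs : List (Bool × List Char))
    (h : k' ≠ k) : glue k cur (glue k' d rs) = (k, cur) :: glue k' d rs := by
  cases rs with
  | nil => simp [glue, h]
  | cons p rs' =>
    obtain ⟨kh, g⟩ := p
    by_cases hk : kh = k' <;> simp [glue, hk, h]

lemma glue_single (t : List Char) (c : Char) :
    glue (isOp c) [c] (runsD t) = runsD (c :: t) := by
  cases t with
  | nil => cases hop : isOp c <;> simp [runsD, glue, hop]
  | cons d t' =>
    cases hop : isOp c <;> cases hd : isOp d <;>
      simp [runsD, glue, hop, hd, List.takeWhile_cons, List.dropWhile_cons]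

lemma bfold_spec (t : List Char) :
    ∀ runs k cur, bFlush (t.foldl bStep (runs, some k, cur)) = runs ++ glue k cur (runsD t) := by
  induction t with
  | nil => intro runs k cur; simp [bFlush, runsD, glue]
  | cons c t' ih =>
    intro runs k cur
    by_cases hk : isOp c = k
    · have hstep : bStep (runs, some k, cur) c = (runs, some k, cur ++ [c]) := by
        simp [bStep, hk]
      rw [List.foldl_cons, hstep, ih]
      rw [← glue_single t' c, hk, glue_glue]
    · have hstep : bStep (runs, some k, cur) c = (runs ++ [(k, cur)], some (isOp c), [c]) := by
        simp [bStep]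
        intro hcontra; exact absurd hcontra.symm hk
      rw [List.foldl_cons, hstep, ih]
      rw [← glue_single t' c, glue_head_ne _ _ _ _ _ hk]
      simp

lemma bRuns_eq_runsD (cs : List Char) : bRuns cs = runsD cs := by
  cases cs with
  | nil => simp [bRuns, bFlush, runsD]
  | cons c t =>
    have hstep : bStep ([], none, []) c = ([], some (isOp c), [c]) := by simp [bStep]
    rw [bRuns, List.foldl_cons, hstep, bfold_spec]
    simp [glue_single]

-- A's whole loop from x = 0 (the first iteration carries the x == 0 special case)
lemma aLoop_top (c : Char) (t : List Char) :
    aLoop (c :: t) (c :: t).length 0 [] [] =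
      (if isOp c then signsFrom (runsD (c :: t)) else "" :: signsFrom (runsD (c :: t)),
        numsFrom (runsD (c :: t))) := by
  have hlt : 0 < (c :: t).length := by simp
  have hc : (c :: t)[0]?.getD ' ' = c := rfl
  have h0 : (c :: t).drop 0 = c :: t := rfl
  by_cases hop : isOp c
  · have htw := aSig_spec (c :: t) (c :: t) 0 [] h0
    have hk1 : 0 < ((c :: t).takeWhile isOp).length := by
      simp [List.takeWhile_cons, hop]
    have hsum := len_takeWhile_add_dropWhile isOp (c :: t)
    have hdrop : (c :: t).drop (0 + ((c :: t).takeWhile isOp).length) =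
        (c :: t).dropWhile isOp := by
      simpa using drop_takeWhile_length isOp (c :: t)
    have hfuel : ((c :: t).dropWhile isOp).length ≤ t.length := by
      simp only [List.length_cons] at hsum
      omega
    rw [show (c :: t).length = t.length + 1 from rfl]
    simp only [aLoop, List.getD_eq_getElem?_getD, hlt, if_pos, hc, hop]
    rw [show (c :: t).length - 0 = (c :: t).length from Nat.sub_zero _, htw]
    dsimp only
    rw [aLoop_spec (c :: t) t.length _ _ _ _ hdrop (by omega) hfuel]
    have hruns : runsD (c :: t) =
        (true, (c :: t).takeWhile isOp) :: runsD ((c :: t).dropWhile isOp) := by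
      rw [runsD]; simp [hop]
    simp [hruns, signsFrom, numsFrom, hop]
  · have htw := aNum_spec (c :: t) (c :: t) 0 [] h0
    have hk1 : 0 < ((c :: t).takeWhile (fun d => !isOp d)).length := by
      simp [List.takeWhile_cons, hop]
    have hsum := len_takeWhile_add_dropWhile (fun d => !isOp d) (c :: t)
    have hdrop : (c :: t).drop (0 + ((c :: t).takeWhile (fun d => !isOp d)).length) =
        (c :: t).dropWhile (fun d => !isOp d) := by
      simpa using drop_takeWhile_length (fun d => !isOp d) (c :: t)
    have hfuel : ((c :: t).dropWhile (fun d => !isOp d)).length ≤ t.length := by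
      simp only [List.length_cons] at hsum
      omega
    rw [show (c :: t).length = t.length + 1 from rfl]
    simp only [aLoop, List.getD_eq_getElem?_getD, hlt, if_pos, hc]
    rw [if_neg hop]
    rw [show (c :: t).length - 0 = (c :: t).length from Nat.sub_zero _, htw]
    dsimp only
    rw [aLoop_spec (c :: t) t.length _ _ _ _ hdrop (by omega) hfuel]
    have hruns : runsD (c :: t) =
        (false, (c :: t).takeWhile (fun d => !isOp d)) ::
          runsD ((c :: t).dropWhile (fun d => !isOp d)) := by
      rw [runsD]; simp [hop]
    simp [hruns, signsFrom, numsFrom, hop]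

-- ===== VERDICT (by name: the statement is the Claim_ definition above) =====
theorem string_dissociator_spec : Claim_equal_string_dissociator := by
  intro s _
  unfold Spec_string_dissociator string_dissociator string_dissociator_alt
  cases hcs : s.toList with
  | nil => simp [aLoop, bRuns, bFlush, signEval]
  | cons c t =>
    dsimp only
    rw [bRuns_eq_runsD, aLoop_top]
    by_cases hop : isOp c <;>
      simp [hop, signsFrom, numsFrom, signEval]
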